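-- pv_equiv track=rewrite | github.com/aviswerdlow/k4 | experiments/flint_otp_traverse/test_keystreams.py | has_consonant_cluster
-- ===== SOURCE A (Python) =====
-- def has_consonant_cluster(text: str, max_consonants: int = 5) -> bool:
--     """Check if text has a cluster of max_consonants or more"""
--     vowels = set('AEIOU')
--     consonant_count = 0
--
--     for char in text:
--         if char not in vowels:
--             consonant_count += 1
--             if consonant_count >= max_consonants:
--                 return True
--         else:
--             consonant_count = 0
--
--     return False
-- ===== SOURCE B (Python) =====
-- from itertools import groupby
--
--
-- def has_consonant_cluster(text: str, max_consonants: int = 5) -> bool: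
--     """Check if text has a cluster of max_consonants or more"""
--     vowels = set('AEIOU')
--     return any(
--         sum(1 for _ in group) >= max_consonants
--         for is_vowel, group in groupby(text, key=lambda c: c in vowels)
--         if not is_vowel
--     )
-- ===== Notes on version B (the rewrite author's own statement) =====
-- stated objective: idiomatic
-- what changed: Replaces the running reset-counter with early return by itertools.groupby splitting the text into maximal vowel/consonant runs, then any() over consonant run lengths >= max_consonants.
import Mathlib
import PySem

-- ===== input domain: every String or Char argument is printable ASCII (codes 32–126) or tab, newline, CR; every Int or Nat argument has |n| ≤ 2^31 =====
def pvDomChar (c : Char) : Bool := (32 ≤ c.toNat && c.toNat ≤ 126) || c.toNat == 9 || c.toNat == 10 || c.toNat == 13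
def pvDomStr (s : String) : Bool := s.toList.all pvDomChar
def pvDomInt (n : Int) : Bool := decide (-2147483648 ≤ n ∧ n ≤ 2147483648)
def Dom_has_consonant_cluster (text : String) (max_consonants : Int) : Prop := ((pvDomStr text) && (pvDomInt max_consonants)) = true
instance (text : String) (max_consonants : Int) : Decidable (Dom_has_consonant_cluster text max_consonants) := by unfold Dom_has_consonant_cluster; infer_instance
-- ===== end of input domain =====

-- B (groupby over maximal vowel/consonant runs) replaces A's running reset-counter; same O(n) cost, different traversal shape. Return values proved equal on all inputs.

-- vowels = set('AEIOU'); 'c in vowels'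
def pvIsVowel (c : Char) : Bool := decide (c ∈ PySem.Set.ofList "AEIOU".toList)

-- ===== PORT A =====
-- loop: for char in text, counting consecutive consonants, early-return True at max_consonants
def pvALoop (cs : List Char) (m : Int) (cnt : Int) : Bool :=
  match cs with
  | [] => false
  | c :: rest =>
    if ¬ (pvIsVowel c = true) then
      if cnt + 1 ≥ m then true else pvALoop rest m (cnt + 1)
    else
      pvALoop rest m 0

def has_consonant_cluster (text : String) (max_consonants : Int) : Bool :=
  pvALoop text.toList max_consonants 0

-- ===== PORT B =====
-- groupby: split into maximal runs of equal key (is_vowel), carrying current key and run length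
def pvGroupGo (cs : List Char) (k : Bool) (n : Nat) : List (Bool × Nat) :=
  match cs with
  | [] => [(k, n)]
  | c :: rest =>
    if pvIsVowel c = k then pvGroupGo rest k (n + 1)
    else (k, n) :: pvGroupGo rest (pvIsVowel c) 1

def pvGroups (cs : List Char) : List (Bool × Nat) :=
  match cs with
  | [] => []
  | c :: rest => pvGroupGo rest (pvIsVowel c) 1

def has_consonant_cluster_alt (text : String) (max_consonants : Int) : Bool :=
  (pvGroups text.toList).any (fun g => !g.1 && decide ((g.2 : Int) ≥ max_consonants))

-- ===== PRECONDITION & SPEC =====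
def Spec_has_consonant_cluster (text : String) (max_consonants : Int) (out : Bool) : Prop := out = has_consonant_cluster_alt text max_consonants
instance (text : String) (max_consonants : Int) (out : Bool) : Decidable (Spec_has_consonant_cluster text max_consonants out) := by unfold Spec_has_consonant_cluster; infer_instance

-- ===== CLAIM (what is proved, stated in full; the proofs are below) =====
def Claim_equal_has_consonant_cluster : Prop := ∀ (text : String) (max_consonants : Int), Dom_has_consonant_cluster text max_consonants → Spec_has_consonant_cluster text max_consonants (has_consonant_cluster text max_consonants)

-- ===== LEMMAS AND PROOFS =====

-- once a consonant run already has length n ≥ m, the final run length can only grow, so B finds it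
theorem pvGroupGo_ge (cs : List Char) (m : Int) :
    ∀ n : Nat, (n : Int) ≥ m →
      (pvGroupGo cs false n).any (fun g => !g.1 && decide ((g.2 : Int) ≥ m)) = true := by
  induction cs with
  | nil => intro n h; simp [pvGroupGo, h]
  | cons c rest ih =>
    intro n h
    by_cases hc : pvIsVowel c = false
    · simp only [pvGroupGo, hc]
      exact ih (n + 1) (by push_cast; omega)
    · simp only [Bool.not_eq_false] at hc
      simp [pvGroupGo, hc, h]

-- invariant tying B's pending run (key, length) to A's counter state
theorem pvGroupGo_aLoop (cs : List Char) (m : Int) :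
    (∀ n : Nat, (n : Int) < m →
      (pvGroupGo cs false n).any (fun g => !g.1 && decide ((g.2 : Int) ≥ m)) = pvALoop cs m (n : Int)) ∧
    (∀ n : Nat,
      (pvGroupGo cs true n).any (fun g => !g.1 && decide ((g.2 : Int) ≥ m)) = pvALoop cs m 0) := by
  induction cs with
  | nil =>
    constructor
    · intro n h
      simp [pvGroupGo, pvALoop]
      omega
    · intro n; simp [pvGroupGo, pvALoop]
  | cons c rest ih =>
    constructor
    · intro n h
      by_cases hc : pvIsVowel c = false
      · simp only [pvGroupGo, hc, pvALoop, Bool.not_eq_true]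
        by_cases hm : (n : Int) + 1 ≥ m
        · rw [if_pos hm]
          exact pvGroupGo_ge rest m (n + 1) (by push_cast; omega)
        · rw [if_neg hm]
          have := ih.1 (n + 1) (by push_cast at hm ⊢; omega)
          push_cast at this ⊢
          rw [this]
      · simp only [Bool.not_eq_false] at hc
        have h2 := ih.2 1
        simp [pvGroupGo, pvALoop, hc, h2]
        omega
    · intro n
      by_cases hc : pvIsVowel c = false
      · rw [show pvGroupGo (c :: rest) true n = (true, n) :: pvGroupGo rest false 1 from by
              simp [pvGroupGo, hc],
            show pvALoop (c :: rest) m 0 = if (0 : Int) + 1 ≥ m then true else pvALoop rest m (0 + 1) from by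
              simp [pvALoop, hc],
            List.any_cons]
        have hz : (!true && decide ((n : Int) ≥ m)) = false := by simp
        rw [hz, Bool.false_or]
        by_cases hm : (0 : Int) + 1 ≥ m
        · rw [if_pos hm]
          exact pvGroupGo_ge rest m 1 (by push_cast at hm ⊢; omega)
        · rw [if_neg hm]
          have := ih.1 1 (by push_cast at hm ⊢; omega)
          push_cast at this; rw [this]; norm_num
      · simp only [Bool.not_eq_false] at hc
        have h2 := ih.2 (n + 1)
        simp [pvGroupGo, pvALoop, hc, h2]

-- ===== VERDICT (by name: the statement is the Claim_ definition above) =====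
theorem has_consonant_cluster_spec : Claim_equal_has_consonant_cluster := by
  intro text m _
  unfold Spec_has_consonant_cluster has_consonant_cluster has_consonant_cluster_alt pvGroups
  cases h : text.toList with
  | nil => simp [pvALoop]
  | cons c rest =>
    by_cases hc : pvIsVowel c = false
    · simp only [hc, pvALoop, Bool.not_eq_true]
      by_cases hm : (0 : Int) + 1 ≥ m
      · rw [if_pos hm]
        exact ((pvGroupGo_ge rest m 1 (by push_cast at hm ⊢; omega))).symm
      · rw [if_neg hm]
        have := (pvGroupGo_aLoop rest m).1 1 (by push_cast at hm ⊢; omega)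
        push_cast at this; rw [this]; norm_num
    · simp only [Bool.not_eq_false] at hc
      simp only [hc, pvALoop]
      exact ((pvGroupGo_aLoop rest m).2 1).symm
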